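-- pv_equiv track=rewrite | github.com/ddu0422/study | algorithm/baekjoon/greedy/silver3/19941(오답).py | solution
-- ===== SOURCE A (Python) =====
-- def solution(m, table):
--     # 사람을 위치로 고정했을 경우 왼쪽에 있는 햄버거를 먹어야 다음 사람이 나올때 더 많은 햄버거를 먹을 수 있다.
--     for i in range(len(table)):
--         if table[i] == 'P':
--             for j in range(i - m, i + m + 1):
--                 # 범위를 벗어나면 안되므로 확인한다.
--                 if 0 <= j < len(table) and table[j] == 'H':
--                     table[j] = 'E'
--                     break
--
--     return table.count('E')
-- ===== SOURCE B (Python) =====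
-- def solution(m, table):
--     # One forward pass: a monotone two-pointer over the precomputed H positions.
--     hs = [i for i, x in enumerate(table) if x == 'H']
--     eaten = table.count('E')
--     p = 0
--     for i, x in enumerate(table):
--         if x == 'P':
--             while p < len(hs) and hs[p] < i - m:
--                 p += 1
--             if p < len(hs) and hs[p] <= i + m:
--                 p += 1
--                 eaten += 1
--     return eaten
-- ===== Notes on version B (the rewrite author's own statement) =====
-- stated objective: alternative
-- what changed: B precomputes the sorted list of H positions and makes one forward pass with a monotone two-pointer (each person takes the first still-available H at index >= i-m provided it is <= i+m), instead of A's per-person rescan of the whole +-m window; B does not mutate the input list (A marks eaten entries 'E' in place), the return value is identical.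
import Mathlib
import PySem

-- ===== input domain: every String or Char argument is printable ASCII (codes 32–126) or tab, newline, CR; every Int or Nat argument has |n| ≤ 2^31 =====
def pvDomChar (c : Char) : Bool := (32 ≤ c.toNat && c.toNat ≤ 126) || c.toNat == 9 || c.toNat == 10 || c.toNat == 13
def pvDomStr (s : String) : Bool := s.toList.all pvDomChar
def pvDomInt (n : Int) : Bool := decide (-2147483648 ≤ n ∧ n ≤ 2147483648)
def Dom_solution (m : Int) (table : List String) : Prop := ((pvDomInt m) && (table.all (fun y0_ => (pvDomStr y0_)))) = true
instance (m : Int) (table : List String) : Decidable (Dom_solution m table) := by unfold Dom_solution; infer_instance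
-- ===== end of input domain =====

-- B replaces A's per-person rescans of the ±m window by one forward pass with a monotone
-- two-pointer over the precomputed list of H positions (objective: alternative).
-- NOTE: the Python A mutates `table` in place (eaten 'H' entries become 'E'); B does not —
-- the equivalence proved here is about the RETURN value only.

-- ===== PORT A =====
-- inner loop: for j in range(i-m, i+m+1): if 0 <= j < len(table) and table[j]=='H': table[j]='E'; break
def solutionInner (t : List String) : List Int → List String
  | [] => t
  | j :: js =>
    if 0 ≤ j ∧ j < (t.length : Int) ∧ PySem.List.pyGetD t j "" = "H" then
      PySem.List.pySetD t j "E"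
    else solutionInner t js

def solutionStep (m : Int) (t : List String) (i : Nat) : List String :=
  if PySem.List.pyGetD t (i : Int) "" = "P" then
    solutionInner t (PySem.List.pyRange ((i : Int) - m) ((i : Int) + m + 1) 1)
  else t

def solution (m : Int) (table : List String) : Int :=
  PySem.List.count ((List.range table.length).foldl (solutionStep m) table) "E"

-- ===== PORT B =====
-- hs = [i for i, x in enumerate(table) if x == 'H']
def altHs (table : List String) : List Int :=
  ((PySem.List.enumerate table 0).filter (fun ix => ix.2 == "H")).map (fun ix => ix.1)

-- while p < len(hs) and hs[p] < bound: p += 1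
def altAdvance (hs : List Int) (bound : Int) (p : Nat) : Nat :=
  if h : p < hs.length then
    if hs[p] < bound then altAdvance hs bound (p + 1) else p
  else p
  termination_by hs.length - p

-- loop body: if x == 'P': advance p; if p < len(hs) and hs[p] <= i + m: p += 1; eaten += 1
def altStep (m : Int) (hs : List Int) (st : Nat × Int) (i : Int) (x : String) : Nat × Int :=
  if x = "P" then
    let p := altAdvance hs (i - m) st.1
    if h : p < hs.length then
      if hs[p] ≤ i + m then (p + 1, st.2 + 1) else (p, st.2)
    else (p, st.2)
  else st

def solution_alt (m : Int) (table : List String) : Int :=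
  ((PySem.List.enumerate table 0).foldl
    (fun st ix => altStep m (altHs table) st ix.1 ix.2)
    (0, PySem.List.count table "E")).2

-- ===== PRECONDITION & SPEC =====
def Spec_solution (m : Int) (table : List String) (out : Int) : Prop := out = solution_alt m table
instance (m : Int) (table : List String) (out : Int) : Decidable (Spec_solution m table out) := by unfold Spec_solution; infer_instance

-- ===== CLAIM (what is proved, stated in full; the proofs are below) =====
def Claim_equal_solution : Prop := ∀ (m : Int) (table : List String), Dom_solution m table → Spec_solution m table (solution m table)

-- ===== LEMMAS AND PROOFS =====

-- The (Nat) positions of the 'H' entries, in increasing order.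
def hsN (table : List String) : List Nat :=
  (List.range table.length).filter (fun k => table.getD k "" == "H")

theorem enum_eq (xs : List String) :
    PySem.List.enumerate xs 0 = (List.range xs.length).map (fun (k : Nat) => ((k : Int), xs.getD k "")) := by
  apply List.ext_getElem?
  intro k
  rw [PySem.List.getElem?_enumerate]
  by_cases h : k < xs.length
  · rw [List.getElem?_eq_getElem h, List.getElem?_eq_getElem (by simpa using h)]
    simp [List.getD_eq_getElem?_getD, List.getElem?_eq_getElem h]
  · rw [List.getElem?_eq_none (by omega), List.getElem?_eq_none (by simpa using h)]
    rfl

theorem altHs_eq (table : List String) :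
    altHs table = (hsN table).map (fun (k : Nat) => (k : Int)) := by
  unfold altHs hsN
  rw [enum_eq, List.filter_map, List.map_map]
  rfl

theorem hsN_pairwise (table : List String) : (hsN table).Pairwise (· < ·) :=
  List.Pairwise.filter _ List.pairwise_lt_range

theorem mem_hsN (table : List String) (k : Nat) :
    k ∈ hsN table ↔ k < table.length ∧ table.getD k "" = "H" := by
  simp [hsN, List.mem_filter, List.mem_range]

theorem hsN_lt (table : List String) {q : Nat} (hq : q < (hsN table).length) :
    (hsN table)[q] < table.length ∧ table.getD (hsN table)[q] "" = "H" :=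
  (mem_hsN table _).mp (List.getElem_mem hq)

theorem hsN_strictMono (table : List String) {q r : Nat} (hq : q < (hsN table).length)
    (hr : r < (hsN table).length) (h : q < r) : (hsN table)[q] < (hsN table)[r] :=
  List.pairwise_iff_getElem.mp (hsN_pairwise table) q r hq hr h

theorem hsN_le_of_le (table : List String) {q r : Nat} (hq : q < (hsN table).length)
    (hr : r < (hsN table).length) (h : q ≤ r) : (hsN table)[q] ≤ (hsN table)[r] := by
  rcases Nat.eq_or_lt_of_le h with rfl | h'
  · exact le_refl _
  · exact (hsN_strictMono table hq hr h').le

theorem getD_set_ne (t : List String) (a k : Nat) (v : String) (h : k ≠ a) :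
    (t.set a v).getD k "" = t.getD k "" := by
  simp [List.getD_eq_getElem?_getD, List.getElem?_set_ne (Ne.symm h)]

theorem getD_set_self (t : List String) (a : Nat) (v : String) (ha : a < t.length) :
    (t.set a v).getD a "" = v := by
  simp [List.getD_eq_getElem?_getD, List.getElem?_set_self ha]

-- the joint loop invariant after the first i outer iterations
def LoopInv (m : Int) (table t : List String) (i p : Nat) (eaten : Int) : Prop :=
  t.length = table.length ∧
  (∀ k, k < table.length → table.getD k "" ≠ "H" → t.getD k "" = table.getD k "") ∧
  p ≤ (hsN table).length ∧
  (∀ q (hq : q < (hsN table).length), p ≤ q → t.getD ((hsN table)[q]'hq) "" = "H") ∧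
  (∀ q (hq : q < (hsN table).length), q < p →
      t.getD ((hsN table)[q]'hq) "" = "E" ∨
      (t.getD ((hsN table)[q]'hq) "" = "H" ∧ ((((hsN table)[q]'hq) : Nat) : Int) < (i : Int) - m)) ∧
  eaten = PySem.List.count t "E"

theorem altAdvance_aux (hs : List Int) (b : Int) :
    ∀ (fuel p : Nat), hs.length - p ≤ fuel → p ≤ hs.length →
      p ≤ altAdvance hs b p ∧ altAdvance hs b p ≤ hs.length ∧
      (∀ q (hq : q < hs.length), p ≤ q → q < altAdvance hs b p → hs[q] < b) ∧
      (∀ h' : altAdvance hs b p < hs.length, b ≤ hs[altAdvance hs b p]) := by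
  intro fuel
  induction fuel with
  | zero =>
    intro p hf hp
    have hple : ¬ p < hs.length := by omega
    rw [altAdvance, dif_neg hple]
    exact ⟨le_refl _, hp, fun q hq h1 h2 => absurd (lt_of_le_of_lt h1 h2) (by omega),
      fun h' => absurd h' hple⟩
  | succ f ih =>
    intro p hf hp
    by_cases h : p < hs.length
    · rw [altAdvance, dif_pos h]
      by_cases hb : hs[p] < b
      · rw [if_pos hb]
        obtain ⟨h1, h2, h3, h4⟩ := ih (p + 1) (by omega) (by omega)
        refine ⟨by omega, h2, ?_, h4⟩
        intro q hq hpq hqlt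
        rcases Nat.eq_or_lt_of_le hpq with rfl | h'
        · exact hb
        · exact h3 q hq h' hqlt
      · rw [if_neg hb]
        exact ⟨le_refl _, h.le, fun q hq h1 h2 => by omega, fun h' => not_lt.mp hb⟩
    · rw [altAdvance, dif_neg h]
      exact ⟨le_refl _, hp, fun q hq h1 h2 => by omega, fun h' => absurd h' h⟩

theorem altAdvance_spec (hs : List Int) (b : Int) (p : Nat) (hp : p ≤ hs.length) :
    p ≤ altAdvance hs b p ∧ altAdvance hs b p ≤ hs.length ∧
    (∀ q (hq : q < hs.length), p ≤ q → q < altAdvance hs b p → hs[q] < b) ∧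
    (∀ h' : altAdvance hs b p < hs.length, b ≤ hs[altAdvance hs b p]) :=
  altAdvance_aux hs b (hs.length - p) p (le_refl _) hp

theorem inner_none (t : List String) (js : List Int)
    (h : ∀ j ∈ js, ¬ (0 ≤ j ∧ j < (t.length : Int) ∧ PySem.List.pyGetD t j "" = "H")) :
    solutionInner t js = t := by
  induction js with
  | nil => rfl
  | cons j js ih =>
    simp only [solutionInner]
    rw [if_neg (h j (by simp))]
    exact ih fun x hx => h x (by simp [hx])

theorem inner_found (t : List String) (js1 js2 : List Int) (j0 : Int)
    (h1 : ∀ j ∈ js1, ¬ (0 ≤ j ∧ j < (t.length : Int) ∧ PySem.List.pyGetD t j "" = "H"))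
    (h0 : 0 ≤ j0 ∧ j0 < (t.length : Int) ∧ PySem.List.pyGetD t j0 "" = "H") :
    solutionInner t (js1 ++ j0 :: js2) = PySem.List.pySetD t j0 "E" := by
  induction js1 with
  | nil =>
    simp only [List.nil_append, solutionInner]
    rw [if_pos h0]
  | cons j js ih =>
    simp only [List.cons_append, solutionInner]
    rw [if_neg (h1 j (by simp))]
    exact ih fun x hx => h1 x (by simp [hx])

theorem count_set_E (t : List String) (a : Nat) (ha : a < t.length) (hne : t.getD a "" ≠ "E") :
    PySem.List.count (t.set a "E") "E" = PySem.List.count t "E" + 1 := by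
  have hv : t[a] ≠ "E" := by rwa [List.getD_eq_getElem t "" ha] at hne
  rw [PySem.List.count_eq, PySem.List.count_eq]
  have hsplit : List.count "E" t =
      List.count "E" (List.take a t) + List.count "E" (List.drop (a + 1) t) := by
    conv_lhs => rw [← List.take_append_drop a t, ← List.getElem_cons_drop ha]
    rw [List.count_append, List.count_cons]
    simp [hv]
  rw [List.set_eq_take_append_cons_drop, if_pos ha, List.count_append, List.count_cons, hsplit]
  simp
  omega

theorem step_inv (m : Int) (table t : List String) (i p : Nat) (eaten : Int)
    (hi : i < table.length) (hinv : LoopInv m table t i p eaten) :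
    LoopInv m table (solutionStep m t i) (i + 1)
      (altStep m (altHs table) (p, eaten) (i : Int) (table.getD i "")).1
      (altStep m (altHs table) (p, eaten) (i : Int) (table.getD i "")).2 := by
  obtain ⟨hlen, hoth, hple, hge, hlt, hcnt⟩ := hinv
  have hlenI : (altHs table).length = (hsN table).length := by
    rw [altHs_eq]; simp
  have hIdx : ∀ (q : Nat) (hq : q < (hsN table).length),
      (altHs table)[q]'(by rw [hlenI]; exact hq) = (((hsN table)[q]'hq : Nat) : Int) := by
    intro q hq; simp only [altHs_eq, List.getElem_map]
  by_cases hP : table.getD i "" = "P"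
  · -- the person case
    have htP : t.getD i "" = "P" := by
      rw [hoth i hi (by rw [hP]; decide)]; exact hP
    have hpleI : p ≤ (altHs table).length := by rw [hlenI]; exact hple
    obtain ⟨hadv1, hadv2, hadv3, hadv4⟩ := altAdvance_spec (altHs table) ((i : Int) - m) p hpleI
    set p' := altAdvance (altHs table) ((i : Int) - m) p with hp'
    have hadv2' : p' ≤ (hsN table).length := by rw [← hlenI]; exact hadv2
    have hskip : ∀ (q : Nat) (hq : q < (hsN table).length), p ≤ q → q < p' →
        ((((hsN table)[q]'hq) : Nat) : Int) < (i : Int) - m := by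
      intro q hq h1 h2
      have := hadv3 q (by rw [hlenI]; exact hq) h1 h2
      rwa [hIdx q hq] at this
    have hstop : ∀ h : p' < (hsN table).length, (i : Int) - m ≤ (((hsN table)[p']'h : Nat) : Int) := by
      intro h
      have := hadv4 (by rw [hlenI]; exact h)
      rwa [hIdx p' h] at this
    have hlt' : ∀ (q : Nat) (hq : q < (hsN table).length), q < p' →
        t.getD ((hsN table)[q]'hq) "" = "E" ∨
        (t.getD ((hsN table)[q]'hq) "" = "H" ∧ ((((hsN table)[q]'hq) : Nat) : Int) < (i : Int) - m) := by
      intro q hq h2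
      rcases Nat.lt_or_ge q p with h1 | h1
      · exact hlt q hq h1
      · exact Or.inr ⟨hge q hq h1, hskip q hq h1 h2⟩
    have hnoH : ∀ j : Int, (i : Int) - m ≤ j → 0 ≤ j → j < (t.length : Int) →
        PySem.List.pyGetD t j "" = "H" →
        ∃ (q : Nat) (hq : q < (hsN table).length), p' ≤ q ∧ j = ((((hsN table)[q]'hq) : Nat) : Int) := by
      intro j hj1 hj0 hjlen hH
      have hkn : j.toNat < table.length := by rw [← hlen]; omega
      have hgd : t.getD j.toNat "" = "H" := by
        rw [PySem.List.pyGetD_eq_getElem t "" hj0 hjlen] at hH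
        rw [List.getD_eq_getElem t "" (by rw [hlen]; exact hkn)]
        exact hH
      have htab : table.getD j.toNat "" = "H" := by
        by_contra hne
        have := hoth j.toNat hkn hne
        rw [this] at hgd
        exact hne hgd
      obtain ⟨q, hq, hEq⟩ := List.mem_iff_getElem.mp ((mem_hsN table _).mpr ⟨hkn, htab⟩)
      refine ⟨q, hq, ?_, by rw [hEq]; omega⟩
      rcases Nat.lt_or_ge q p' with hqp | hqp
      · exfalso
        rcases hlt' q hq hqp with hE | ⟨_, hsm⟩
        · rw [hEq, hgd] at hE; exact absurd hE (by decide)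
        · rw [hEq] at hsm; omega
      · exact hqp
    by_cases hpl : ∃ h : p' < (hsN table).length, (((hsN table)[p']'h : Nat) : Int) ≤ (i : Int) + m
    · obtain ⟨hplen, hpm⟩ := hpl
      have haL : (hsN table)[p'] < table.length := (hsN_lt table hplen).1
      have haH : table.getD ((hsN table)[p']'hplen) "" = "H" := (hsN_lt table hplen).2
      have htaH : t.getD ((hsN table)[p']'hplen) "" = "H" := hge p' hplen hadv1
      have ham : (i : Int) - m ≤ (((hsN table)[p']'hplen : Nat) : Int) := hstop hplen
      have hAeq : solutionStep m t i = t.set ((hsN table)[p']'hplen) "E" := by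
        simp only [solutionStep, PySem.List.pyGetD_natCast]
        rw [if_pos htP]
        have hsplit : PySem.List.pyRange ((i : Int) - m) ((i : Int) + m + 1) 1 =
            PySem.List.pyRange ((i : Int) - m) (((hsN table)[p']'hplen : Nat) : Int) 1 ++
              (((hsN table)[p']'hplen : Nat) : Int) ::
              PySem.List.pyRange ((((hsN table)[p']'hplen : Nat) : Int) + 1) ((i : Int) + m + 1) 1 := by
          rw [PySem.List.pyRange_one_append ((i : Int) - m) (((hsN table)[p']'hplen : Nat) : Int)
            ((i : Int) + m + 1) ham (by omega)]
          rw [PySem.List.pyRange_one_cons (a := (((hsN table)[p']'hplen : Nat) : Int))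
            (b := (i : Int) + m + 1) (by omega)]
        rw [hsplit]
        refine (inner_found t _ _ _ ?_ ?_).trans (PySem.List.pySetD_natCast t _ "E")
        · intro j hj hqual
          rw [PySem.List.mem_pyRange_one] at hj
          obtain ⟨q, hq, hpq, hEq⟩ := hnoH j hj.1 hqual.1 hqual.2.1 hqual.2.2
          have hle : (hsN table)[p']'hplen ≤ (hsN table)[q]'hq := hsN_le_of_le table hplen hq hpq
          rw [hEq] at hj
          omega
        · refine ⟨by omega, ?_, ?_⟩
          · rw [hlen]; exact_mod_cast haL
          · rw [PySem.List.pyGetD_natCast]; exact htaH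
      have hBeq : altStep m (altHs table) (p, eaten) (i : Int) (table.getD i "") =
          (p' + 1, eaten + 1) := by
        simp only [altStep]
        rw [if_pos hP]
        rw [dif_pos (show p' < (altHs table).length by rw [hlenI]; exact hplen)]
        rw [if_pos (by rw [hIdx p' hplen]; exact hpm)]
      rw [hAeq, hBeq]
      refine ⟨by simp [hlen], ?_, by omega, ?_, ?_, ?_⟩
      · intro k hk hkH
        have hka : k ≠ (hsN table)[p']'hplen := fun h => hkH (h ▸ haH)
        rw [getD_set_ne t _ k _ hka]
        exact hoth k hk hkH
      · intro q hq hq1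
        have hgt : (hsN table)[p']'hplen < (hsN table)[q]'hq :=
          hsN_strictMono table hplen hq (by omega)
        rw [getD_set_ne t _ _ _ (Ne.symm (ne_of_lt hgt))]
        exact hge q hq (by omega)
      · intro q hq hq1
        rcases Nat.lt_or_ge q p' with h | h
        · have hne : (hsN table)[q]'hq ≠ (hsN table)[p']'hplen :=
            ne_of_lt (hsN_strictMono table hq hplen h)
          rcases hlt' q hq h with hE | ⟨hH', hsm⟩
          · left; rw [getD_set_ne t _ _ _ hne]; exact hE
          · right
            refine ⟨by rw [getD_set_ne t _ _ _ hne]; exact hH', ?_⟩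
            push_cast
            omega
        · have hq'' : q = p' := by omega
          subst hq''
          left
          exact getD_set_self t _ "E" (by rw [hlen]; exact haL)
      · show eaten + 1 = (PySem.List.count (t.set ((hsN table)[p']'hplen) "E") "E" : Int)
        rw [count_set_E t _ (by rw [hlen]; exact haL) (by rw [htaH]; decide)]
        push_cast
        omega
    · have hnw : ∀ j ∈ PySem.List.pyRange ((i : Int) - m) ((i : Int) + m + 1) 1,
          ¬ (0 ≤ j ∧ j < (t.length : Int) ∧ PySem.List.pyGetD t j "" = "H") := by
        intro j hj hqual
        rw [PySem.List.mem_pyRange_one] at hj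
        obtain ⟨q, hq, hpq, hEq⟩ := hnoH j hj.1 hqual.1 hqual.2.1 hqual.2.2
        have hplen : p' < (hsN table).length := lt_of_le_of_lt hpq hq
        have h1 : ¬ ((((hsN table)[p']'hplen) : Nat) : Int) ≤ (i : Int) + m :=
          fun hc => hpl ⟨hplen, hc⟩
        have h2 : (hsN table)[p']'hplen ≤ (hsN table)[q]'hq := hsN_le_of_le table hplen hq hpq
        rw [hEq] at hj
        omega
      have hAeq : solutionStep m t i = t := by
        simp only [solutionStep, PySem.List.pyGetD_natCast]
        rw [if_pos htP]
        exact inner_none t _ hnw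
      have hBeq : altStep m (altHs table) (p, eaten) (i : Int) (table.getD i "") = (p', eaten) := by
        simp only [altStep]
        rw [if_pos hP]
        by_cases h : p' < (altHs table).length
        · rw [dif_pos h]
          rw [if_neg (by
            intro hc
            rw [hIdx p' (by rw [← hlenI]; exact h)] at hc
            exact hpl ⟨by rw [← hlenI]; exact h, hc⟩)]
        · rw [dif_neg h]
      rw [hAeq, hBeq]
      refine ⟨hlen, hoth, hadv2', ?_, ?_, hcnt⟩
      · intro q hq h1
        exact hge q hq (le_trans hadv1 h1)
      · intro q hq h1
        rcases hlt' q hq h1 with hE | ⟨hH', hsm⟩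
        · exact Or.inl hE
        · exact Or.inr ⟨hH', by push_cast; omega⟩
  · -- not a person: both sides do nothing
    have htne : t.getD i "" ≠ "P" := by
      by_cases hH : table.getD i "" = "H"
      · obtain ⟨q, hq, hEq⟩ := List.mem_iff_getElem.mp ((mem_hsN table i).mpr ⟨hi, hH⟩)
        rcases Nat.lt_or_ge q p with h' | h'
        · rcases hlt q hq h' with hE | ⟨hH', _⟩
          · rw [hEq] at hE; rw [hE]; decide
          · rw [hEq] at hH'; rw [hH']; decide
        · have := hge q hq h'
          rw [hEq] at this; rw [this]; decide
      · rw [hoth i hi hH]; exact hP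
    have hAeq : solutionStep m t i = t := by
      simp only [solutionStep, PySem.List.pyGetD_natCast]
      rw [if_neg htne]
    have hBeq : altStep m (altHs table) (p, eaten) (i : Int) (table.getD i "") = (p, eaten) := by
      simp only [altStep]
      rw [if_neg hP]
    rw [hAeq, hBeq]
    refine ⟨hlen, hoth, hple, hge, ?_, hcnt⟩
    intro q hq h'
    rcases hlt q hq h' with hE | ⟨hH', hsm⟩
    · exact Or.inl hE
    · exact Or.inr ⟨hH', by push_cast; omega⟩

theorem loop_inv (m : Int) (table : List String) (K : Nat) (hK : K ≤ table.length) :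
    LoopInv m table ((List.range K).foldl (solutionStep m) table) K
      ((List.range K).foldl (fun st (k : Nat) => altStep m (altHs table) st (k : Int) (table.getD k ""))
        (0, PySem.List.count table "E")).1
      ((List.range K).foldl (fun st (k : Nat) => altStep m (altHs table) st (k : Int) (table.getD k ""))
        (0, PySem.List.count table "E")).2 := by
  induction K with
  | zero =>
    simp only [List.range_zero, List.foldl_nil]
    refine ⟨rfl, fun k hk h => rfl, Nat.zero_le _, ?_, ?_, rfl⟩
    · intro q hq _
      exact (hsN_lt table hq).2
    · intro q hq h
      omega
  | succ K ih =>
    have hi : K < table.length := by omega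
    rw [List.range_succ, List.foldl_append, List.foldl_append]
    simp only [List.foldl_cons, List.foldl_nil]
    have := step_inv m table _ K _ _ hi (ih (by omega))
    simpa using this


-- ===== VERDICT (by name: the statement is the Claim_ definition above) =====
theorem solution_spec : Claim_equal_solution := by
  intro m table _
  unfold Spec_solution solution solution_alt
  rw [enum_eq, List.foldl_map]
  have h := loop_inv m table table.length (le_refl _)
  exact (h.2.2.2.2.2).symm
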